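-- pv_equiv track=rewrite | github.com/BrokenCranium1/Car-Number-Plate-Detection-System | Main.py | generate_possible_texts
-- ===== SOURCE A (Python) =====
-- def generate_possible_texts(text, corrections):
--     possible_texts = [text]
--
--     for char_index, char in enumerate(text):
--         if char in corrections:
--             new_char = corrections[char]
--             new_texts = []
--             for possible_text in possible_texts:
--                 new_text = possible_text[:char_index] + new_char + possible_text[char_index + 1:]
--                 new_texts.append(new_text)
--             possible_texts.extend(new_texts)
--
--     return possible_texts
-- ===== SOURCE B (Python) =====
-- def generate_possible_texts(text, corrections):
--     # subset enumeration over the table of correctable positions (mask order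
--     # reproduces A's doubling order: first correctable position = LSB)
--     ps = [(i, corrections[c]) for i, c in enumerate(text) if c in corrections]
--     result = []
--     for mask in range(2 ** len(ps)):
--         s = text
--         for b, (i, rep) in enumerate(ps):
--             if (mask >> b) & 1:
--                 s = s[:i] + rep + s[i + 1:]
--         result.append(s)
--     return result
-- ===== Notes on version B (the rewrite author's own statement) =====
-- stated objective: alternative
-- what changed: B replaces A's repeated list-doubling (extend with a modified copy of the whole accumulator at each correctable character) by direct subset enumeration: it first builds the table of correctable positions with their replacements, then for each mask in range(2**k) applies exactly the corrections named by the mask bits (first position = LSB), which reproduces A's order and values exactly.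
import Mathlib
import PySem

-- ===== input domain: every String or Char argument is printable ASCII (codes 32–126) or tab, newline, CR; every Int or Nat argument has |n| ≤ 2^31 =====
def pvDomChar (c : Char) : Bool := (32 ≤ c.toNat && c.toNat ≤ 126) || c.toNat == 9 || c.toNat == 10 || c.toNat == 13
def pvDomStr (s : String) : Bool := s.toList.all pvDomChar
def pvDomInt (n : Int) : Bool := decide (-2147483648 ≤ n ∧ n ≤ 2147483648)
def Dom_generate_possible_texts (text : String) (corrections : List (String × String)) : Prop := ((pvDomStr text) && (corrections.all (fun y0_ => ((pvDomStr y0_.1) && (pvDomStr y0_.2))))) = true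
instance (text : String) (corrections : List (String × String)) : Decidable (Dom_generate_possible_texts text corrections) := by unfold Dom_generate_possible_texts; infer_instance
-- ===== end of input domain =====

-- B replaces A's accumulator-doubling loop by direct bitmask subset enumeration over the
-- table of correctable positions (same values, same order; alternative decomposition, not faster).


-- ===== PORT A =====
-- splice t i rep = t[:i] + rep + t[i+1:]  (on the char-list side)
def pvSplice (t : List Char) (i : Int) (rep : List Char) : List Char :=
  PySem.List.slice t none (some i) ++ rep ++ PySem.List.slice t (some (i + 1)) none

-- the 'for char_index, char in enumerate(text)' loop of A, carrying possible_texts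
def pvA_loop (corr : List (String × String)) (acc : List (List Char)) :
    List (Int × Char) → List (List Char)
  | [] => acc
  | (i, c) :: rest =>
    match PySem.Dict.get? (PySem.Dict.mk corr) (String.mk [c]) with
    | none => pvA_loop corr acc rest
    | some nc => pvA_loop corr (acc ++ acc.map (fun t => pvSplice t i nc.toList)) rest

def generate_possible_texts (text : String) (corrections : List (String × String)) : List String :=
  (pvA_loop corrections [text.toList] (PySem.List.enumerate text.toList 0)).map String.mk

-- ===== PORT B =====
-- ps = [(i, corrections[c]) for i, c in enumerate(text) if c in corrections]
def pvPs (corr : List (String × String)) (es : List (Int × Char)) : List (Int × List Char) :=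
  es.filterMap (fun p =>
    (PySem.Dict.get? (PySem.Dict.mk corr) (String.mk [p.2])).map (fun r => (p.1, r.toList)))

-- the inner 'for b, (i, rep) in enumerate(ps): if (mask >> b) & 1: …' loop
def pvApplyMask (mask b : Nat) (s : List Char) : List (Int × List Char) → List Char
  | [] => s
  | (i, rep) :: rest =>
    pvApplyMask mask (b + 1) (if mask.testBit b then pvSplice s i rep else s) rest

def generate_possible_texts_alt (text : String) (corrections : List (String × String)) : List String :=
  let ps := pvPs corrections (PySem.List.enumerate text.toList 0)
  (List.range (2 ^ ps.length)).map (fun mask => String.mk (pvApplyMask mask 0 text.toList ps))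

-- ===== PRECONDITION & SPEC =====
def Spec_generate_possible_texts (text : String) (corrections : List (String × String)) (out : List String) : Prop := out = generate_possible_texts_alt text corrections
instance (text : String) (corrections : List (String × String)) (out : List String) : Decidable (Spec_generate_possible_texts text corrections out) := by unfold Spec_generate_possible_texts; infer_instance

-- ===== CLAIM (what is proved, stated in full; the proofs are below) =====
def Claim_equal_generate_possible_texts : Prop := ∀ (text : String) (corrections : List (String × String)), Dom_generate_possible_texts text corrections → Spec_generate_possible_texts text corrections (generate_possible_texts text corrections)

-- ===== LEMMAS AND PROOFS =====

-- shifting the bit counter is shifting the mask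
theorem pvApplyMask_shift (ps : List (Int × List Char)) :
    ∀ (mask b : Nat) (s : List Char),
      pvApplyMask mask (b + 1) s ps = pvApplyMask (mask >>> 1) b s ps := by
  induction ps with
  | nil => intro mask b s; rfl
  | cons p rest ih =>
    intro mask b s
    obtain ⟨i, rep⟩ := p
    simp only [pvApplyMask, Nat.testBit_shiftRight]
    rw [show 1 + b = b + 1 from Nat.add_comm 1 b, ih]

-- flatMap over range (2*n) splits into even/odd mask pairs
theorem flatMap_range_two_mul {α : Type} (F : Nat → List α) :
    ∀ n : Nat, (List.range (2 * n)).flatMap F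
      = (List.range n).flatMap (fun m => F (2 * m) ++ F (2 * m + 1)) := by
  intro n
  induction n with
  | zero => rfl
  | succ n ih =>
    rw [Nat.mul_succ, show 2 * n + 2 = (2 * n + 1) + 1 from rfl,
      List.range_succ, List.range_succ, List.range_succ]
    simp [ih]

-- main invariant: A's doubling loop enumerates masks over the correctable suffix,
-- each mask applied to every element of the accumulator, masks outermost
theorem pvA_loop_eq (corr : List (String × String)) :
    ∀ (es : List (Int × Char)) (acc : List (List Char)),
      pvA_loop corr acc es
        = (List.range (2 ^ (pvPs corr es).length)).flatMap
            (fun mask => acc.map (fun t => pvApplyMask mask 0 t (pvPs corr es))) := by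
  intro es
  induction es with
  | nil =>
    intro acc
    simp [pvA_loop, pvPs, pvApplyMask]
  | cons p rest ih =>
    intro acc
    obtain ⟨i, c⟩ := p
    show pvA_loop corr acc ((i, c) :: rest) = _
    rw [pvA_loop]
    cases hg : PySem.Dict.get? (PySem.Dict.mk corr) (String.mk [c]) with
    | none =>
      simp only [pvPs, List.filterMap_cons, hg, Option.map_none]
      exact ih acc
    | some nc =>
      simp only [pvPs, List.filterMap_cons, hg, Option.map_some]
      rw [ih]
      set qs := rest.filterMap (fun p =>
        (PySem.Dict.get? (PySem.Dict.mk corr) (String.mk [p.2])).map (fun r => (p.1, r.toList)))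
      have hlen : ((i, nc.toList) :: qs).length = qs.length + 1 := rfl
      rw [hlen, pow_succ, Nat.mul_comm, flatMap_range_two_mul]
      refine List.flatMap_congr (fun m _ => ?_)
      have key : ∀ (k : Nat) (t : List Char),
          pvApplyMask k 0 t ((i, nc.toList) :: qs)
            = pvApplyMask (k >>> 1) 0 (if k.testBit 0 then pvSplice t i nc.toList else t) qs := by
        intro k t
        rw [pvApplyMask, pvApplyMask_shift]
      have hev : (2 * m) >>> 1 = m := by omega
      have hod : (2 * m + 1) >>> 1 = m := by omega
      have hqs : pvPs corr rest = qs := rfl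
      have hbe : ¬ (2 * m).testBit 0 := by simp [Nat.testBit_zero]
      have hbo : (2 * m + 1).testBit 0 := by simp [Nat.testBit_zero]
      simp only [List.map_append, List.map_map]
      congr 1
      · apply List.map_congr_left; intro t _
        rw [key, hev, if_neg hbe, hqs]
      · apply List.map_congr_left; intro t _
        rw [key, hod, if_pos hbo, hqs]
        rfl

-- flatMap over singleton bodies is map
theorem pvFlatMap_singleton_map {α β : Type} (f : α → β) (l : List α) :
    l.flatMap (fun a => [f a]) = l.map f := by
  induction l with
  | nil => rfl
  | cons x xs ih => simp [List.flatMap_cons, ih]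

-- ===== VERDICT (by name: the statement is the Claim_ definition above) =====
theorem generate_possible_texts_spec : Claim_equal_generate_possible_texts := by
  intro text corrections _
  unfold Spec_generate_possible_texts generate_possible_texts generate_possible_texts_alt
  rw [pvA_loop_eq]
  rw [List.map_flatMap]
  exact pvFlatMap_singleton_map _ _
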